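-- pv_equiv track=rewrite | github.com/slimanebou/Grammar-Transformer | BOUAROUA_ASSIS/commun.py | generer_variantes_epsilon
-- ===== SOURCE A (Python) =====
-- from itertools import product
--
-- def generer_variantes_epsilon(droite: str, epsilon_produits: set):
--     # Identifier les positions des non-terminaux epsilon-productifs dans la règle
--     positions = [i for i, char in enumerate(droite) if char in epsilon_produits]
--
--     # Si aucun epsilon-produit, retourne simplement la règle
--     if not positions:
--         return {droite}
--
--     # Générer toutes les combinaisons de True (garder) ou False (supprimer) pour chaque position
--     variantes = set()
--     for combinaison in product([True, False], repeat=len(positions)):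
--         nouvelle_regle = list(droite)
--         for i, garder in enumerate(combinaison):
--             if not garder:
--                 # Remplace par vide (supprime le caractère à cette position)
--                 nouvelle_regle[positions[i]] = ""
--         variante = "".join(nouvelle_regle)  # Reconstitue la règle
--         if variante:  # Élimine les variantes totalement vides (hors axiome)
--             variantes.add(variante)
--     return variantes
-- ===== SOURCE B (Python) =====
-- def generer_variantes_epsilon(droite: str, epsilon_produits: set):
--     # If no character is epsilon-productive, return the rule unchanged (unfiltered).
--     if not any(ch in epsilon_produits for ch in droite):
--         return {droite}
--     # One left-to-right pass: each partial string is either extended with the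
--     # character (keep) or, when the character is epsilon-productive, also left
--     # unchanged (delete). Finally drop the fully-empty variant.
--     acc = [""]
--     for ch in droite:
--         if ch in epsilon_produits:
--             acc = [v for s in acc for v in (s + ch, s)]
--         else:
--             acc = [s + ch for s in acc]
--     return set(acc) - {""}
-- ===== Notes on version B (the rewrite author's own statement) =====
-- stated objective: simpler
-- what changed: Replaces the positions list and the itertools.product enumeration of keep/delete masks by a single left-to-right pass that doubles the set of partial variants at each epsilon-productive character, then removes the empty string at the end.
import Mathlib
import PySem

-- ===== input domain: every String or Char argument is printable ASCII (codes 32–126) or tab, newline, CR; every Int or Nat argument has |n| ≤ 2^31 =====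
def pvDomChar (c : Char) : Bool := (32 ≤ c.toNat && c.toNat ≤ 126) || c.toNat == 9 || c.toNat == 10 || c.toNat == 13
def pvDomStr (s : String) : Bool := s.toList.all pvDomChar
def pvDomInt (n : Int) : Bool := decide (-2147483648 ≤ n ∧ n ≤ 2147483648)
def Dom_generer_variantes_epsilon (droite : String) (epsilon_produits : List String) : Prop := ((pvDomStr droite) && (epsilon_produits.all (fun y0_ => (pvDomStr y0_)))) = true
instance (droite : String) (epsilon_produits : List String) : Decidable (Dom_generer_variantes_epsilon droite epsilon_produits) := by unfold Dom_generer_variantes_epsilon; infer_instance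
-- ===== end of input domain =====

-- B replaces the positions list and the itertools.product mask enumeration by one
-- left-to-right pass that doubles the partial-variant list at each epsilon-productive
-- character, then removes the empty string (objective: simpler).
-- Python strings are represented on the List Char side (String.ofList at the end):
-- "".join(list_of_pieces) is List.flatten there, exact on all inputs.

-- ===== PORT A =====
-- itertools.product([True, False], repeat=n), in product order (first slot slowest)
def pvProductTF : Nat → List (List Bool)
  | 0 => [[]]
  | n+1 => [true, false].flatMap (fun b => (pvProductTF n).map (fun c => b :: c))

def generer_variantes_epsilon (droite : String) (epsilon_produits : List String) : List String :=
  let chars := droite.toList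
  let positions : List Int :=
    ((PySem.List.enumerate chars).filter (fun p => epsilon_produits.contains (String.ofList [p.2]))).map (fun p => p.1)
  if positions.isEmpty then PySem.Set.ofList [droite]
  else
    let variantes : PySem.Set (List Char) :=
      (pvProductTF positions.length).foldl (fun vs comb =>
        let nouvelle_regle := chars.map (fun c => [c])
        let nouvelle_regle := (PySem.List.enumerate comb).foldl (fun nr p =>
          if p.2 then nr
          else PySem.List.pySetD nr (PySem.List.pyGetD positions p.1 0) []) nouvelle_regle
        let variante := nouvelle_regle.flatten
        if variante ≠ [] then PySem.Set.add vs variante else vs) PySem.Set.empty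
    variantes.map (fun l => String.ofList l)

-- ===== PORT B =====
def generer_variantes_epsilon_alt (droite : String) (epsilon_produits : List String) : List String :=
  let chars := droite.toList
  if chars.any (fun ch => epsilon_produits.contains (String.ofList [ch])) then
    let acc := chars.foldl (fun acc ch =>
      if epsilon_produits.contains (String.ofList [ch]) then
        acc.flatMap (fun s => [s ++ [ch], s])
      else acc.map (fun s => s ++ [ch])) [([] : List Char)]
    (PySem.Set.diff (PySem.Set.ofList acc) [[]]).map (fun l => String.ofList l)
  else PySem.Set.ofList [droite]

-- ===== PRECONDITION & SPEC =====
def Spec_generer_variantes_epsilon (droite : String) (epsilon_produits : List String) (out : List String) : Prop := out = generer_variantes_epsilon_alt droite epsilon_produits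
instance (droite : String) (epsilon_produits : List String) (out : List String) : Decidable (Spec_generer_variantes_epsilon droite epsilon_produits out) := by unfold Spec_generer_variantes_epsilon; infer_instance

-- ===== CLAIM (what is proved, stated in full; the proofs are below) =====
def Claim_equal_generer_variantes_epsilon : Prop := ∀ (droite : String) (epsilon_produits : List String), Dom_generer_variantes_epsilon droite epsilon_produits → Spec_generer_variantes_epsilon droite epsilon_produits (generer_variantes_epsilon droite epsilon_produits)

-- ===== LEMMAS AND PROOFS =====

-- the common variant sequence, in A's product order / B's construction order
def pvV (P : Char → Bool) : List Char → List (List Char)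
  | [] => [[]]
  | c :: cs => if P c then (pvV P cs).map (c :: ·) ++ pvV P cs else (pvV P cs).map (c :: ·)

theorem pvV_cons_pos (P : Char → Bool) (c : Char) (cs : List Char) (h : P c = true) :
    pvV P (c :: cs) = (pvV P cs).map (c :: ·) ++ pvV P cs := by simp [pvV, h]

theorem pvV_cons_neg (P : Char → Bool) (c : Char) (cs : List Char) (h : P c = false) :
    pvV P (c :: cs) = (pvV P cs).map (c :: ·) := by simp [pvV, h]

-- A's positions list, from an arbitrary enumerate start
def pvPos (P : Char → Bool) (chars : List Char) (s : Int) : List Int :=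
  ((PySem.List.enumerate chars s).filter (fun p => P p.2)).map (fun p => p.1)

-- A's inner loop (set nouvelle_regle[positions[i]] := "" for each deleted i)
def pvMask (ps : List Int) (nr : List (List Char)) (comb : List Bool) : List (List Char) :=
  (PySem.List.enumerate comb).foldl (fun nr p =>
    if p.2 then nr
    else PySem.List.pySetD nr (PySem.List.pyGetD ps p.1 0) []) nr

theorem pvPos_def (epsilon_produits : List String) (chars : List Char) :
    ((PySem.List.enumerate chars).filter (fun p => epsilon_produits.contains (String.ofList [p.2]))).map (fun p => p.1)
    = pvPos (fun c => epsilon_produits.contains (String.ofList [c])) chars 0 := rfl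

theorem pvMask_def (ps : List Int) (nr : List (List Char)) (comb : List Bool) :
    (PySem.List.enumerate comb).foldl (fun nr p =>
      if p.2 then nr
      else PySem.List.pySetD nr (PySem.List.pyGetD ps p.1 0) []) nr = pvMask ps nr comb := rfl

theorem pvEnum_shift {α : Type} (xs : List α) (s : Int) :
    PySem.List.enumerate xs (s + 1) = (PySem.List.enumerate xs s).map (fun p => (p.1 + 1, p.2)) := by
  induction xs generalizing s with
  | nil => simp [PySem.List.enumerate_nil]
  | cons x xs ih => simp [PySem.List.enumerate_cons, ih (s + 1)]

theorem pvPos_cons (P : Char → Bool) (c : Char) (cs : List Char) (s : Int) :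
    pvPos P (c :: cs) s = (if P c then [s] else []) ++ pvPos P cs (s + 1) := by
  simp [pvPos, PySem.List.enumerate_cons, List.filter_cons]
  split <;> simp

theorem pvPos_shift (P : Char → Bool) (cs : List Char) (s : Int) :
    pvPos P cs (s + 1) = (pvPos P cs s).map (· + 1) := by
  simp only [pvPos, pvEnum_shift, List.filter_map, List.map_map]
  rfl

theorem pvPos_nonneg (P : Char → Bool) (chars : List Char) (s : Int) :
    ∀ q ∈ pvPos P chars s, s ≤ q := by
  intro q hq
  simp only [pvPos, List.mem_map, List.mem_filter] at hq
  obtain ⟨p, ⟨hp, _⟩, rfl⟩ := hq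
  rw [PySem.List.mem_enumerate_iff] at hp
  obtain ⟨k, hk, rfl⟩ := hp
  omega

theorem pvPos_eq_nil_iff (P : Char → Bool) (chars : List Char) (s : Int) :
    pvPos P chars s = [] ↔ chars.any P = false := by
  induction chars generalizing s with
  | nil => simp [pvPos, PySem.List.enumerate_nil]
  | cons c cs ih =>
    rw [pvPos_cons]
    cases h : P c <;> simp [h, ih]

theorem pvProductTF_succ (n : Nat) :
    pvProductTF (n + 1) = ((pvProductTF n).map (true :: ·)) ++ ((pvProductTF n).map (false :: ·)) := by
  simp [pvProductTF]

theorem pvProductTF_length : ∀ (k : Nat), ∀ comb ∈ pvProductTF k, comb.length = k := by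
  intro k
  induction k with
  | zero => simp [pvProductTF]
  | succ n ih =>
    intro comb hc
    simp [pvProductTF] at hc
    rcases hc with ⟨c, hc, rfl⟩ | ⟨c, hc, rfl⟩ <;> simp [ih c hc]

theorem pvMask_nil (ps : List Int) (nr : List (List Char)) : pvMask ps nr [] = nr := rfl

theorem pvMask_shiftfold (q : Int) (ps : List Int) :
    ∀ (comb : List Bool) (k : Nat) (nr : List (List Char)),
    (PySem.List.enumerate comb ((k : Int) + 1)).foldl (fun nr p =>
        if p.2 then nr
        else PySem.List.pySetD nr (PySem.List.pyGetD (q :: ps) p.1 0) []) nr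
    = (PySem.List.enumerate comb (k : Int)).foldl (fun nr p =>
        if p.2 then nr
        else PySem.List.pySetD nr (PySem.List.pyGetD ps p.1 0) []) nr := by
  intro comb
  induction comb with
  | nil => intro k nr; simp [PySem.List.enumerate_nil]
  | cons b bs ih =>
    intro k nr
    have hcast : (k : Int) + 1 = ((k + 1 : Nat) : Int) := by push_cast; ring
    rw [PySem.List.enumerate_cons, PySem.List.enumerate_cons]
    simp only [List.foldl_cons]
    have hget : PySem.List.pyGetD (q :: ps) ((k : Int) + 1) 0 = PySem.List.pyGetD ps (k : Int) 0 := by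
      rw [hcast, PySem.List.pyGetD_natCast, PySem.List.pyGetD_natCast]
      simp [List.getD]
    have h2 : (k : Int) + 1 + 1 = ((k + 1 : Nat) : Int) + 1 := by push_cast; ring
    rw [hget, h2, ih (k + 1)]
    norm_cast

theorem pvMask_cons (q : Int) (ps : List Int) (nr : List (List Char)) (b : Bool) (comb : List Bool) :
    pvMask (q :: ps) nr (b :: comb)
    = pvMask ps (if b then nr else PySem.List.pySetD nr q []) comb := by
  unfold pvMask
  rw [PySem.List.enumerate_cons]
  simp only [List.foldl_cons]
  have h0 : (0 : Int) + 1 = ((0 : Nat) : Int) + 1 := by norm_num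
  have h1 : PySem.List.pyGetD (q :: ps) 0 0 = q := PySem.List.pyGetD_zero_cons _ _ _
  rw [h1, h0, pvMask_shiftfold q ps comb 0]
  norm_num

theorem pvMask_shift (ps : List Int) (comb : List Bool) (x : List Char) (nr : List (List Char))
    (h0 : ∀ q ∈ ps, 0 ≤ q) (hl : comb.length = ps.length) :
    pvMask (ps.map (· + 1)) (x :: nr) comb = x :: pvMask ps nr comb := by
  induction comb generalizing ps nr with
  | nil =>
    cases ps with
    | nil => simp [pvMask_nil]
    | cons q qs => simp at hl
  | cons b bs ih =>
    cases ps with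
    | nil => simp at hl
    | cons q qs =>
      simp only [List.map_cons]
      rw [pvMask_cons, pvMask_cons]
      have hq : 0 ≤ q := h0 q (by simp)
      have hset : PySem.List.pySetD (x :: nr) (q + 1) ([] : List Char)
          = x :: PySem.List.pySetD nr q [] := by
        rw [PySem.List.pySetD_of_nonneg (x :: nr) ([] : List Char) (show (0:Int) ≤ q + 1 by omega),
            PySem.List.pySetD_of_nonneg nr ([] : List Char) hq]
        have ht : (q + 1).toNat = q.toNat + 1 := by omega
        rw [ht, List.set_cons_succ]
      have hnr : (if b then (x :: nr) else PySem.List.pySetD (x :: nr) (q + 1) [])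
          = x :: (if b then nr else PySem.List.pySetD nr q []) := by
        cases b <;> simp [hset]
      rw [hnr, ih qs _ (fun q hq => h0 q (by simp [hq])) (by simpa using hl)]

-- A's mapped product sequence equals pvV
theorem pvAseq_eq_V (P : Char → Bool) (chars : List Char) :
    (pvProductTF (pvPos P chars 0).length).map
      (fun comb => (pvMask (pvPos P chars 0) (chars.map (fun c => [c])) comb).flatten)
    = pvV P chars := by
  induction chars with
  | nil => simp [pvPos, PySem.List.enumerate_nil, pvProductTF, pvMask_nil, pvV]
  | cons c cs ih =>
    have hnn := pvPos_nonneg P cs 0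
    have hlen := pvProductTF_length (pvPos P cs 0).length
    cases hPc : P c with
    | false =>
      have hpos : pvPos P (c :: cs) 0 = (pvPos P cs 0).map (· + 1) := by
        rw [pvPos_cons, hPc, pvPos_shift P cs 0]
        simp
      rw [hpos, pvV_cons_neg P c cs hPc]
      have h1 : (pvProductTF ((pvPos P cs 0).map (· + 1)).length).map
          (fun comb => (pvMask ((pvPos P cs 0).map (· + 1)) ((c :: cs).map (fun c => [c])) comb).flatten)
          = (pvProductTF (pvPos P cs 0).length).map
            (fun comb => c :: (pvMask (pvPos P cs 0) (cs.map (fun c => [c])) comb).flatten) := by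
        rw [List.length_map]
        refine List.map_congr_left (fun comb hc => ?_)
        rw [List.map_cons, pvMask_shift _ _ _ _ hnn (hlen comb hc)]
        simp
      rw [h1, ← ih, List.map_map]
      rfl
    | true =>
      have hpos : pvPos P (c :: cs) 0 = (0 : Int) :: (pvPos P cs 0).map (· + 1) := by
        rw [pvPos_cons, hPc, pvPos_shift P cs 0]
        simp
      rw [hpos, pvV_cons_pos P c cs hPc]
      have hLlen : ((0 : Int) :: (pvPos P cs 0).map (· + 1)).length = (pvPos P cs 0).length + 1 := by
        simp
      rw [hLlen, pvProductTF_succ, List.map_append, List.map_map, List.map_map]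
      have hT : (pvProductTF (pvPos P cs 0).length).map
          ((fun comb => (pvMask ((0 : Int) :: (pvPos P cs 0).map (· + 1)) ((c :: cs).map (fun c => [c])) comb).flatten) ∘ (true :: ·))
          = (pvProductTF (pvPos P cs 0).length).map
            (fun comb => c :: (pvMask (pvPos P cs 0) (cs.map (fun c => [c])) comb).flatten) := by
        refine List.map_congr_left (fun comb hc => ?_)
        show (pvMask ((0 : Int) :: (pvPos P cs 0).map (· + 1)) ((c :: cs).map (fun c => [c])) (true :: comb)).flatten
            = c :: (pvMask (pvPos P cs 0) (cs.map (fun c => [c])) comb).flatten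
        rw [List.map_cons, pvMask_cons]
        simp only [if_true]
        rw [pvMask_shift _ _ _ _ hnn (hlen comb hc)]
        simp
      have hF : (pvProductTF (pvPos P cs 0).length).map
          ((fun comb => (pvMask ((0 : Int) :: (pvPos P cs 0).map (· + 1)) ((c :: cs).map (fun c => [c])) comb).flatten) ∘ (false :: ·))
          = (pvProductTF (pvPos P cs 0).length).map
            (fun comb => (pvMask (pvPos P cs 0) (cs.map (fun c => [c])) comb).flatten) := by
        refine List.map_congr_left (fun comb hc => ?_)
        show (pvMask ((0 : Int) :: (pvPos P cs 0).map (· + 1)) ((c :: cs).map (fun c => [c])) (false :: comb)).flatten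
            = (pvMask (pvPos P cs 0) (cs.map (fun c => [c])) comb).flatten
        rw [List.map_cons, pvMask_cons]
        simp only [Bool.false_eq_true, if_false]
        have hset : PySem.List.pySetD ([c] :: cs.map (fun c => [c])) (0 : Int) ([] : List Char)
            = [] :: cs.map (fun c => [c]) := by
          rw [PySem.List.pySetD_of_nonneg _ _ (le_refl (0 : Int))]
          rfl
        rw [hset, pvMask_shift _ _ _ _ hnn (hlen comb hc)]
        simp
      rw [hT, hF, ih]
      have hmap : (pvProductTF (pvPos P cs 0).length).map
          (fun comb => c :: (pvMask (pvPos P cs 0) (cs.map (fun c => [c])) comb).flatten)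
          = ((pvProductTF (pvPos P cs 0).length).map
              (fun comb => (pvMask (pvPos P cs 0) (cs.map (fun c => [c])) comb).flatten)).map (c :: ·) := by
        rw [List.map_map]
        rfl
      rw [hmap, ih]

-- B's fold characterisation
theorem pvFoldB (P : Char → Bool) (chars : List Char) :
    ∀ acc : List (List Char),
    chars.foldl (fun acc ch =>
      if P ch then acc.flatMap (fun s => [s ++ [ch], s])
      else acc.map (fun s => s ++ [ch])) acc
    = acc.flatMap (fun s => (pvV P chars).map (s ++ ·)) := by
  induction chars with
  | nil => intro acc; simp [pvV]
  | cons c cs ih =>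
    intro acc
    rw [List.foldl_cons, ih]
    cases hPc : P c with
    | true =>
      rw [if_pos rfl, pvV_cons_pos P c cs hPc, List.flatMap_assoc]
      congr 1
      funext s
      simp only [List.flatMap_cons, List.flatMap_nil, List.append_nil, List.map_append,
        List.map_map, Function.comp_def]
      congr 1
      exact List.map_congr_left (fun v _ => (List.append_cons s c v).symm)
    | false =>
      rw [if_neg Bool.false_ne_true, pvV_cons_neg P c cs hPc, List.flatMap_map]
      congr 1
      funext s
      simp only [List.map_map, Function.comp_def]
      exact List.map_congr_left (fun v _ => (List.append_cons s c v).symm)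

-- A's add-if-nonempty fold is an add fold over the filtered list
theorem pvFoldAddIf (L : List (List Char)) :
    ∀ s : PySem.Set (List Char),
    L.foldl (fun vs v => if v ≠ [] then PySem.Set.add vs v else vs) s
    = (L.filter (fun v => !v.isEmpty)).foldl PySem.Set.add s := by
  induction L with
  | nil => intro s; rfl
  | cons v L ih =>
    intro s
    rw [List.foldl_cons, List.filter_cons]
    by_cases hv : v = []
    · subst hv
      rw [if_neg (by simp), if_neg (by simp)]
      exact ih s
    · rw [if_pos hv, if_pos (by simp [hv]), List.foldl_cons]
      exact ih (PySem.Set.add s v)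

-- diff commutes with the add fold
theorem pvDiffFoldAdd (t : PySem.Set (List Char)) (L : List (List Char)) :
    ∀ s : PySem.Set (List Char), s.Nodup →
    PySem.Set.diff (L.foldl PySem.Set.add s) t
    = (L.filter (fun v => !(PySem.Set.contains t v))).foldl PySem.Set.add (PySem.Set.diff s t) := by
  induction L with
  | nil => intro s _; rfl
  | cons v L ih =>
    intro s hs
    rw [List.foldl_cons, List.filter_cons]
    by_cases hvt : v ∈ t
    · have hc : (!(PySem.Set.contains t v)) = false := by
        simp [PySem.Set.contains_iff, hvt]
      rw [hc, if_neg (by simp), ih _ (PySem.Set.nodup_add s v hs)]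
      congr 1
      by_cases hvs : v ∈ s
      · rw [PySem.Set.add_of_mem hvs]
      · rw [PySem.Set.add_of_not_mem hvs]
        show List.filter (fun x => !(PySem.Set.contains t x)) (s ++ [v])
            = List.filter (fun x => !(PySem.Set.contains t x)) s
        rw [List.filter_append]
        have hone : List.filter (fun x => !(PySem.Set.contains t x)) [v] = [] := by
          simp [hvt]
        rw [hone, List.append_nil]
    · have hc : (!(PySem.Set.contains t v)) = true := by
        cases hcv : PySem.Set.contains t v
        · rfl
        · exact absurd ((PySem.Set.contains_iff t v).mp hcv) hvt
      rw [hc, if_pos rfl, ih _ (PySem.Set.nodup_add s v hs), List.foldl_cons]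
      congr 1
      by_cases hvs : v ∈ s
      · rw [PySem.Set.add_of_mem hvs, PySem.Set.add_of_mem]
        show v ∈ List.filter (fun x => !(PySem.Set.contains t x)) s
        rw [List.mem_filter]
        exact ⟨hvs, hc⟩
      · rw [PySem.Set.add_of_not_mem hvs, PySem.Set.add_of_not_mem (by
          show v ∉ List.filter (fun x => !(PySem.Set.contains t x)) s
          simp [List.mem_filter, hvs])]
        show List.filter (fun x => !(PySem.Set.contains t x)) (s ++ [v])
            = List.filter (fun x => !(PySem.Set.contains t x)) s ++ [v]
        rw [List.filter_append]
        have hone : List.filter (fun x => !(PySem.Set.contains t x)) [v] = [v] := by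
          simp [hvt]
        rw [hone]

theorem pvSetSide (L : List (List Char)) :
    L.foldl (fun vs v => if v ≠ [] then PySem.Set.add vs v else vs) PySem.Set.empty
    = PySem.Set.diff (PySem.Set.ofList L) [[]] := by
  rw [pvFoldAddIf, PySem.Set.ofList_eq_foldl, pvDiffFoldAdd [[]] L [] List.nodup_nil]
  have hempty : PySem.Set.diff ([] : PySem.Set (List Char)) [[]] = ([] : PySem.Set (List Char)) := rfl
  rw [hempty]
  congr 1
  refine List.filter_congr (fun v _ => ?_)
  by_cases hv : v = []
  · subst hv; decide
  · have h1 : (!v.isEmpty) = true := by simp [hv]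
    have h2 : PySem.Set.contains [[]] v = false := by
      cases hcv : PySem.Set.contains [[]] v
      · rfl
      · exact absurd (by simpa using (PySem.Set.contains_iff [[]] v).mp hcv) hv
    rw [h1, h2]
    rfl

-- A's outer fold, in terms of the variant list
theorem pvFoldA_gen (ps : List Int) (nr0 : List (List Char)) (combos : List (List Bool)) :
    combos.foldl (fun vs comb =>
        if (pvMask ps nr0 comb).flatten ≠ []
        then PySem.Set.add vs ((pvMask ps nr0 comb).flatten) else vs) PySem.Set.empty
    = (combos.map (fun comb => (pvMask ps nr0 comb).flatten)).foldl
        (fun vs v => if v ≠ [] then PySem.Set.add vs v else vs) PySem.Set.empty := by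
  have h := List.foldl_map (f := fun comb => (pvMask ps nr0 comb).flatten)
    (g := fun vs v => if v ≠ [] then PySem.Set.add vs v else vs)
    (l := combos) (init := (PySem.Set.empty : PySem.Set (List Char)))
  exact h.symm

-- ===== VERDICT (by name: the statement is the Claim_ definition above) =====
theorem generer_variantes_epsilon_spec : Claim_equal_generer_variantes_epsilon := by
  intro droite eps _dom
  unfold Spec_generer_variantes_epsilon
  simp only [generer_variantes_epsilon, generer_variantes_epsilon_alt]
  rw [pvPos_def eps droite.toList]
  simp only [pvMask_def]
  by_cases h : droite.toList.any (fun ch => eps.contains (String.ofList [ch])) = true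
  · have hne : ¬ ((pvPos (fun c => eps.contains (String.ofList [c])) droite.toList 0).isEmpty = true) := by
      rw [List.isEmpty_iff, pvPos_eq_nil_iff]
      intro hfalse
      rw [h] at hfalse
      exact absurd hfalse (by decide)
    rw [if_neg hne, if_pos h]
    rw [pvFoldA_gen, pvAseq_eq_V, pvSetSide]
    rw [pvFoldB (fun c => eps.contains (String.ofList [c])) droite.toList [[]]]
    simp only [List.flatMap_cons, List.flatMap_nil, List.append_nil, List.nil_append, List.map_id']
  · have he : (pvPos (fun c => eps.contains (String.ofList [c])) droite.toList 0).isEmpty = true := by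
      rw [List.isEmpty_iff, pvPos_eq_nil_iff]
      simpa using h
    rw [if_pos he, if_neg h]
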